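-- pv_equiv track=rewrite | github.com/Tito047/Mini-ECG | test12.py | maxvalinlist
-- ===== SOURCE A (Python) =====
-- def maxvalinlist(L):
--     b=[]
--     c=[]
--     for i in range(0,len(L)-1):
--         if L[i+1]-L[i]<10  :
--             b.append(L[i])
--         else:
--             c.append(b)
--             b=[]
--     return(c)
-- ===== SOURCE B (Python) =====
-- def maxvalinlist(L):
--     breaks = [i for i in range(len(L) - 1) if L[i + 1] - L[i] >= 10]
--     prev = -1
--     c = []
--     for j in breaks:
--         c.append(L[prev + 1:j])
--         prev = j
--     return c
-- ===== Notes on version B (the rewrite author's own statement) =====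
-- stated objective: alternative
-- what changed: B first computes the list of break indices (where the jump is >= 10) in one comprehension, then emits each group as the slice between consecutive breaks, instead of A's single pass that accumulates a running group list element by element.
import Mathlib
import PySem

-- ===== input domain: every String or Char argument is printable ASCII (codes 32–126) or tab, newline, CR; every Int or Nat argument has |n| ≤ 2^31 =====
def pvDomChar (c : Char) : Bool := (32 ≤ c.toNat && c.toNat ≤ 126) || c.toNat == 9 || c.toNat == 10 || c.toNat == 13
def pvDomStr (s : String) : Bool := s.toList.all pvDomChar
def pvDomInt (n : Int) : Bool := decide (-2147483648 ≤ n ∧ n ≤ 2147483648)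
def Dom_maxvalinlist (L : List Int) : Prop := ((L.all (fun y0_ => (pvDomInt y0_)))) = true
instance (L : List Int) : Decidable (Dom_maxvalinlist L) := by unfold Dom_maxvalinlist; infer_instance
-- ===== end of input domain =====

-- B groups the list via a precomputed break-index table and slices, instead of A's
-- element-by-element accumulator pass; objective: alternative decomposition (same cost).

-- ===== PORT A =====
-- one loop iteration of A: append L[i] to the running group, or flush the group
def aStep (L : List Int) (st : List Int × List (List Int)) (i : Int) :
    List Int × List (List Int) :=
  if PySem.List.pyGetD L (i + 1) 0 - PySem.List.pyGetD L i 0 < 10 then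
    (st.1 ++ [PySem.List.pyGetD L i 0], st.2)
  else
    ([], st.2 ++ [st.1])

def maxvalinlist (L : List Int) : List (List Int) :=
  ((PySem.List.pyRange 0 ((L.length : Int) - 1) 1).foldl (aStep L) ([], [])).2

-- ===== PORT B =====
-- breaks = [i for i in range(len(L)-1) if L[i+1]-L[i] >= 10]
def bBreaks (L : List Int) : List Int :=
  (PySem.List.pyRange 0 ((L.length : Int) - 1) 1).filter
    (fun i => 10 ≤ PySem.List.pyGetD L (i + 1) 0 - PySem.List.pyGetD L i 0)

-- one loop iteration of B: c.append(L[prev+1:j]); prev = j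
def bStep (L : List Int) (st : Int × List (List Int)) (j : Int) :
    Int × List (List Int) :=
  (j, st.2 ++ [PySem.List.slice L (some (st.1 + 1)) (some j)])

def maxvalinlist_alt (L : List Int) : List (List Int) :=
  ((bBreaks L).foldl (bStep L) (-1, [])).2

-- ===== PRECONDITION & SPEC =====
def Spec_maxvalinlist (L : List Int) (out : List (List Int)) : Prop := out = maxvalinlist_alt L
instance (L : List Int) (out : List (List Int)) : Decidable (Spec_maxvalinlist L out) := by unfold Spec_maxvalinlist; infer_instance

-- ===== CLAIM (what is proved, stated in full; the proofs are below) =====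
def Claim_equal_maxvalinlist : Prop := ∀ (L : List Int), Dom_maxvalinlist L → Spec_maxvalinlist L (maxvalinlist L)

-- ===== LEMMAS AND PROOFS =====

-- the group A is building after processing indices q..a-1 is exactly the slice L[q:a]
theorem maxvalinlist_invariant (L : List Int) :
    ∀ (k a q : Nat) (c : List (List Int)), q ≤ a → a + k ≤ L.length →
    (((List.range' a k).map (fun (n : Nat) => (n : Int))).foldl (aStep L)
        ((L.drop q).take (a - q), c)).2
    = ((((List.range' a k).map (fun (n : Nat) => (n : Int))).filter
          (fun i => decide (10 ≤ PySem.List.pyGetD L (i + 1) 0 - PySem.List.pyGetD L i 0))).foldl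
        (bStep L) ((q : Int) - 1, c)).2 := by
  intro k
  induction k with
  | zero => intro a q c _ _; simp
  | succ k ih =>
    intro a q c hqa hlen
    have ha : a < L.length := by omega
    have hget : PySem.List.pyGetD L ((a : Nat) : Int) 0 = L[a] := by
      rw [PySem.List.pyGetD_natCast]
      exact List.getD_eq_getElem L 0 ha
    rw [List.range'_succ]
    by_cases h : 10 ≤ PySem.List.pyGetD L ((a : Int) + 1) 0 - PySem.List.pyGetD L (a : Int) 0
    · -- break at a: A flushes the group, B emits the slice L[q:a] and sets prev = a
      have hslice : PySem.List.slice L (some ((q : Int) - 1 + 1)) (some (a : Int))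
          = (L.drop q).take (a - q) := by
        have hq1 : (q : Int) - 1 + 1 = (q : Int) := by ring
        rw [hq1, PySem.List.slice_natCast]
      rw [List.map_cons, List.filter_cons, if_pos (decide_eq_true h), List.foldl_cons,
          List.foldl_cons]
      rw [show aStep L ((L.drop q).take (a - q), c) ((a : Int))
            = ((L.drop (a + 1)).take ((a + 1) - (a + 1)), c ++ [(L.drop q).take (a - q)]) by
          unfold aStep
          rw [if_neg (not_lt.mpr h)]
          simp]
      rw [show bStep L ((q : Int) - 1, c) ((a : Int))
            = (((a + 1 : Nat) : Int) - 1, c ++ [(L.drop q).take (a - q)]) by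
          unfold bStep
          rw [hslice]
          congr 1
          push_cast
          ring]
      exact ih (a + 1) (a + 1) (c ++ [(L.drop q).take (a - q)]) (le_refl _) (by omega)
    · -- no break at a: A appends L[a] to the group; the slice grows by one
      have hgrow : (L.drop q).take (a - q) ++ [PySem.List.pyGetD L ((a : Nat) : Int) 0]
          = (L.drop q).take ((a + 1) - q) := by
        rw [hget]
        have h1 : (a + 1) - q = (a - q) + 1 := by omega
        rw [h1, List.take_add_one]
        have h2 : (L.drop q)[a - q]? = some L[a] := by
          rw [List.getElem?_drop]
          have h3 : q + (a - q) = a := by omega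
          rw [h3, List.getElem?_eq_getElem ha]
        simp [h2]
      rw [List.map_cons, List.filter_cons, if_neg (ne_true_of_eq_false (decide_eq_false h)),
          List.foldl_cons]
      rw [show aStep L ((L.drop q).take (a - q), c) ((a : Int))
            = ((L.drop q).take ((a + 1) - q), c) by
          unfold aStep
          rw [if_pos (lt_of_not_ge h), hgrow]]
      exact ih (a + 1) q c (by omega) (by omega)

-- ===== VERDICT (by name: the statement is the Claim_ definition above) =====
theorem maxvalinlist_spec : Claim_equal_maxvalinlist := by
  intro L _
  show maxvalinlist L = maxvalinlist_alt L
  cases L with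
  | nil => decide
  | cons x xs =>
    unfold maxvalinlist maxvalinlist_alt bBreaks
    have hlen : ((x :: xs).length : Int) - 1 = ((xs.length : Nat) : Int) := by
      simp only [List.length_cons]; push_cast; ring
    rw [hlen, PySem.List.pyRange_zero_natCast, List.range_eq_range']
    have := maxvalinlist_invariant (x :: xs) xs.length 0 0 [] (le_refl 0) (by simp)
    simpa using this
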